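-- pv_equiv track=rewrite | github.com/Ivey00/EncryptionProject | encryption-app.py | vernam_encrypt
-- ===== SOURCE A (Python) =====
-- def to_binary(text: str) -> str:
--     return ' '.join(format(ord(char), '08b') for char in text)
--
-- def to_decimal(text: str) -> str:
--     return ' '.join(str(ord(char)) for char in text)
--
-- def pad_key(text: str, key: str) -> str:
--     return (key * (len(text) // len(key) + 1))[:len(text)]
--
-- def vernam_encrypt(plaintext: str, key: str) -> dict:
--     key = pad_key(plaintext, key)
--     ciphertext = ''.join(chr(ord(p) ^ ord(k)) for p, k in zip(plaintext, key))
--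
--     return {
--         'binary': to_binary(ciphertext),
--         'ascii': ciphertext,
--         'decimal': to_decimal(ciphertext)
--     }
-- ===== SOURCE B (Python) =====
-- def vernam_encrypt(plaintext: str, key: str) -> dict:
--     # Block-wise: XOR whole key-sized slices of the plaintext against the key,
--     # collecting integer code points; derive all three encodings from that list.
--     n = len(key)
--     codes = []
--     for i in range(0, len(plaintext), n):
--         codes.extend(ord(p) ^ ord(k) for p, k in zip(plaintext[i:i + n], key))
--     binary = ' '.join(''.join('01'[(c >> b) & 1] for b in (7, 6, 5, 4, 3, 2, 1, 0))
--                       for c in codes)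
--     return {
--         'binary': binary,
--         'ascii': ''.join(map(chr, codes)),
--         'decimal': ' '.join(map(str, codes)),
--     }
-- ===== Notes on version B (the rewrite author's own statement) =====
-- stated objective: alternative
-- what changed: B processes the plaintext block-wise in key-sized slices (no padded key string and no cyclic indexing), accumulating a list of integer XOR code points, and derives all three encodings from that list, computing the binary form by bit arithmetic instead of format(); Pre_ excludes only key = '', where A raises ZeroDivisionError (B raises ValueError there).
import Mathlib
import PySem

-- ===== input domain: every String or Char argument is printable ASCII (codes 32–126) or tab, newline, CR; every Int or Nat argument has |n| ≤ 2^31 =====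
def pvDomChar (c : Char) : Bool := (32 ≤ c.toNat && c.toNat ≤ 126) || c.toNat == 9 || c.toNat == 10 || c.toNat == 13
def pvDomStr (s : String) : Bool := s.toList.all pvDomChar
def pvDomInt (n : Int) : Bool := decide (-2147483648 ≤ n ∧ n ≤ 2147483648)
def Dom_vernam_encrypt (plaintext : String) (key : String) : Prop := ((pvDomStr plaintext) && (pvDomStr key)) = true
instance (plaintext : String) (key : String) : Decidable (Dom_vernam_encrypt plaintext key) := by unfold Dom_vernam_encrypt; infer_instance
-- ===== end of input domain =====

-- B processes the plaintext block-wise in key-sized slices (no padded key, no cyclic index),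
-- collects the XOR code points as one integer list and derives all three encodings from it,
-- computing the binary form by bit arithmetic (objective: alternative).

-- ===== PORT A =====
-- format(n, '08b') for n ≥ 0 (binary digits, zero-padded to width 8); exact for Nat
def bin8 (n : Nat) : List Char := PySem.Chars.zfill (Nat.toDigits 2 n) 8

def to_binary (text : List Char) : String :=
  String.ofList (PySem.Chars.join [' '] (text.map (fun c => bin8 c.toNat)))

def to_decimal (text : List Char) : String :=
  String.ofList (PySem.Chars.join [' '] (text.map (fun c => PySem.Int.toChars (Int.ofNat c.toNat))))

-- (key * (len(text) // len(key) + 1))[:len(text)]  — lengths are nonneg so // is Nat division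
def pad_key (text : List Char) (key : List Char) : List Char :=
  (PySem.List.pyRepeat key ((text.length / key.length : Nat) + 1)).take text.length

def vernam_encrypt (plaintext : String) (key : String) : List (String × String) :=
  let pt := plaintext.toList
  let k := pad_key pt key.toList
  let ciphertext := (pt.zip k).map (fun pq => Char.ofNat (pq.1.toNat ^^^ pq.2.toNat))
  [("binary", to_binary ciphertext),
   ("ascii", String.ofList ciphertext),
   ("decimal", to_decimal ciphertext)]

-- ===== PORT B =====
-- the range(0, len(plaintext), n) loop with slicing, as structural recursion on the
-- remaining plaintext; the kl = [] guard only makes it total (Python raises there, outside Pre_)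
def chunkCodes (kl : List Char) (pt : List Char) : List Nat :=
  if h : kl.length = 0 ∨ pt = [] then []
  else ((pt.take kl.length).zip kl).map (fun pq => pq.1.toNat ^^^ pq.2.toNat)
       ++ chunkCodes kl (pt.drop kl.length)
termination_by pt.length
decreasing_by
  push_neg at h
  have := List.length_pos_iff.mpr h.2
  simp only [List.length_drop]
  omega

-- ''.join('01'[(c >> b) & 1] for b in (7, 6, 5, 4, 3, 2, 1, 0))
def bits8 (c : Nat) : List Char :=
  [7, 6, 5, 4, 3, 2, 1, 0].map (fun b => if (c >>> b) &&& 1 == 1 then '1' else '0')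

def vernam_encrypt_alt (plaintext : String) (key : String) : List (String × String) :=
  let codes := chunkCodes key.toList plaintext.toList
  [("binary", String.ofList (PySem.Chars.join [' '] (codes.map bits8))),
   ("ascii", String.ofList (codes.map Char.ofNat)),
   ("decimal", String.ofList (PySem.Chars.join [' '] (codes.map (fun c => PySem.Int.toChars (Int.ofNat c)))))]

-- ===== PRECONDITION & SPEC =====
-- Pre_ excludes only key = "", on which Python A raises ZeroDivisionError in pad_key.
def Pre_vernam_encrypt (plaintext : String) (key : String) : Prop := key.toList ≠ []
instance (plaintext : String) (key : String) : Decidable (Pre_vernam_encrypt plaintext key) := by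
  unfold Pre_vernam_encrypt; infer_instance

def pvWitness_vernam_encrypt : String × String := ("hi", "k")

def Spec_vernam_encrypt (plaintext : String) (key : String) (out : List (String × String)) : Prop :=
  out = vernam_encrypt_alt plaintext key
instance (plaintext : String) (key : String) (out : List (String × String)) : Decidable (Spec_vernam_encrypt plaintext key out) := by unfold Spec_vernam_encrypt; infer_instance

-- ===== CLAIM (what is proved, stated in full; the proofs are below) =====
def Claim_equal_vernam_encrypt : Prop := ∀ (plaintext : String) (key : String), Dom_vernam_encrypt plaintext key → Pre_vernam_encrypt plaintext key → Spec_vernam_encrypt plaintext key (vernam_encrypt plaintext key)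

-- ===== LEMMAS AND PROOFS =====

theorem toNat_ofNat_lt {n : Nat} (h : n < 128) : (Char.ofNat n).toNat = n := by
  have hv : n.isValidChar := Or.inl (by omega)
  simp [Char.ofNat, Char.ofNatAux, hv, Char.toNat]

set_option maxRecDepth 8192 in
theorem bin8_eq_bits8 : ∀ n < 256, bin8 n = bits8 n := by decide

theorem flatten_replicate_getD (kl : List Char) (hk : kl ≠ []) :
    ∀ (m i : Nat), i < m * kl.length →
      ((List.replicate m kl).flatten).getD i ' ' = kl.getD (i % kl.length) ' ' := by
  intro m
  induction m with
  | zero => intro i hi; omega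
  | succ m ih =>
    intro i hi
    have hmul : (m + 1) * kl.length = m * kl.length + kl.length := by ring
    rw [List.replicate_succ, List.flatten_cons]
    by_cases hlt : i < kl.length
    · rw [List.getD_append _ _ _ _ hlt, Nat.mod_eq_of_lt hlt]
    · push_neg at hlt
      rw [List.getD_append_right _ _ _ _ hlt, ih (i - kl.length) (by omega),
        (Nat.mod_eq_sub_mod hlt).symm]

theorem cast_add_one_toNat (m : Nat) : ((m : Int) + 1).toNat = m + 1 := by omega

theorem lt_pad_bound (L n : Nat) (hn : 0 < n) : L < (L / n + 1) * n := by
  have hd := Nat.div_add_mod L n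
  have hm : L % n < n := Nat.mod_lt _ hn
  have hmul : (L / n + 1) * n = n * (L / n) + n := by ring
  omega

theorem pad_length (pt kl : List Char) (h : kl ≠ []) : (pad_key pt kl).length = pt.length := by
  have hn : 0 < kl.length := List.length_pos_iff.mpr h
  unfold pad_key PySem.List.pyRepeat
  rw [List.length_take, List.length_flatten, cast_add_one_toNat]
  simp only [List.map_replicate, List.sum_replicate, smul_eq_mul]
  exact Nat.min_eq_left (Nat.le_of_lt (lt_pad_bound pt.length kl.length hn))

theorem pad_getD (pt kl : List Char) (h : kl ≠ []) (i : Nat) (hi : i < pt.length) :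
    (pad_key pt kl).getD i ' ' = kl.getD (i % kl.length) ' ' := by
  have hn : 0 < kl.length := List.length_pos_iff.mpr h
  unfold pad_key PySem.List.pyRepeat
  rw [List.getD, List.getElem?_take, if_pos hi, ← List.getD, cast_add_one_toNat,
    flatten_replicate_getD kl h _ i (Nat.lt_trans hi (lt_pad_bound pt.length kl.length hn))]

theorem mem_pad (pt kl : List Char) (c : Char) (hc : c ∈ pad_key pt kl) : c ∈ kl := by
  unfold pad_key PySem.List.pyRepeat at hc
  have := (List.take_sublist _ _).subset hc
  rcases List.mem_flatten.mp this with ⟨s, hs, hcs⟩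
  rwa [List.eq_of_mem_replicate hs] at hcs

-- the padded key splits as one full key block (truncated to the text) plus the padding of the rest
theorem pad_split (pt kl : List Char) (h : kl ≠ []) :
    pad_key pt kl = kl.take pt.length ++ pad_key (pt.drop kl.length) kl := by
  have hn : 0 < kl.length := List.length_pos_iff.mpr h
  have hL := pad_length pt kl h
  have hL2 := pad_length (pt.drop kl.length) kl h
  apply List.ext_getElem
  · simp [hL, hL2]; omega
  · intro i h1 h2
    have hiL : i < pt.length := by omega
    have lhs : (pad_key pt kl)[i] = kl.getD (i % kl.length) ' ' := by
      rw [← pad_getD pt kl h i hiL, List.getD_eq_getElem _ _ h1]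
    rw [lhs]
    by_cases hlt : i < (kl.take pt.length).length
    · rw [List.getElem_append_left hlt, List.getElem_take]
      have : i < kl.length := by
        have := hlt; rw [List.length_take] at this; omega
      rw [Nat.mod_eq_of_lt this, List.getD_eq_getElem]
    · push_neg at hlt
      have hkle : kl.length ≤ i := by
        rw [List.length_take] at hlt; omega
      rw [List.getElem_append_right hlt]
      have htk : (kl.take pt.length).length = kl.length := by
        rw [List.length_take]; omega
      have hrest : i - (kl.take pt.length).length < (pad_key (pt.drop kl.length) kl).length := by
        rw [hL2, htk, List.length_drop]; omega
      rw [← List.getD_eq_getElem _ ' ' hrest,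
        pad_getD (pt.drop kl.length) kl h _ (by rw [List.length_drop]; omega), htk,
        (Nat.mod_eq_sub_mod hkle).symm]

theorem zip_split {α β : Type} (n : Nat) (l : List α) (x y : List β)
    (hx : (l.take n).length = x.length) :
    l.zip (x ++ y) = (l.take n).zip x ++ (l.drop n).zip y := by
  conv_lhs => rw [← List.take_append_drop n l]
  exact List.zip_append hx

theorem zip_take_eq {α β : Type} (a : List α) (kl : List β) (L : Nat) (ha : a.length ≤ L) :
    a.zip (kl.take L) = a.zip kl := by
  apply List.ext_getElem
  · simp; omega
  · intro i h1 h2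
    simp only [List.getElem_zip, List.getElem_take]

theorem chunk_eq (kl : List Char) (h : kl ≠ []) (pt : List Char) :
    chunkCodes kl pt
      = (pt.zip (pad_key pt kl)).map (fun pq => pq.1.toNat ^^^ pq.2.toNat) := by
  have hn : 0 < kl.length := List.length_pos_iff.mpr h
  have main : ∀ N pt : List Char, pt.length ≤ N.length →
      chunkCodes kl pt
        = (pt.zip (pad_key pt kl)).map (fun pq => pq.1.toNat ^^^ pq.2.toNat) := by
    intro N
    induction N with
    | nil =>
      intro pt hle
      have hpt : pt = [] := List.length_eq_zero_iff.mp (by simpa using hle)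
      subst hpt
      rw [chunkCodes, dif_pos (Or.inr rfl)]
      simp
    | cons c N ih =>
      intro pt hle
      by_cases hpt : pt = []
      · subst hpt
        rw [chunkCodes, dif_pos (Or.inr rfl)]
        simp
      · have hptl : 0 < pt.length := List.length_pos_iff.mpr hpt
        rw [chunkCodes, dif_neg (by push_neg; exact ⟨by omega, hpt⟩)]
        rw [pad_split pt kl h,
          zip_split kl.length pt (kl.take pt.length) (pad_key (pt.drop kl.length) kl)
            (by rw [List.length_take, List.length_take, Nat.min_comm]),
          zip_take_eq (pt.take kl.length) kl pt.length
            (by rw [List.length_take]; omega),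
          List.map_append,
          ih (pt.drop kl.length) (by rw [List.length_drop]; simp at hle; omega)]
  exact main pt pt (le_refl _)

-- ===== VERDICT (by name: the statement is the Claim_ definition above) =====
theorem vernam_encrypt_spec : Claim_equal_vernam_encrypt := by
  intro plaintext key hdom hpre
  have hpre' : key.toList ≠ [] := hpre
  have hchar : ∀ c : Char, pvDomChar c = true → c.toNat < 128 := by
    intro c hc
    simp only [pvDomChar, Bool.or_eq_true, Bool.and_eq_true, decide_eq_true_eq, beq_iff_eq] at hc
    omega
  have hdom' := hdom
  simp only [Dom_vernam_encrypt, pvDomStr, Bool.and_eq_true, List.all_eq_true] at hdom'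
  obtain ⟨hp, hk⟩ := hdom'
  have hb : ∀ pq ∈ plaintext.toList.zip (pad_key plaintext.toList key.toList),
      pq.1.toNat ^^^ pq.2.toNat < 128 := by
    intro pq hpq
    obtain ⟨h1, h2⟩ := List.of_mem_zip hpq
    exact Nat.xor_lt_two_pow (n := 7) (hchar _ (hp _ h1)) (hchar _ (hk _ (mem_pad _ _ _ h2)))
  have hbin : ((plaintext.toList.zip (pad_key plaintext.toList key.toList)).map
        (fun pq => pq.1.toNat ^^^ pq.2.toNat)).map bits8
      = ((plaintext.toList.zip (pad_key plaintext.toList key.toList)).map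
        (fun pq => Char.ofNat (pq.1.toNat ^^^ pq.2.toNat))).map (fun c => bin8 c.toNat) := by
    simp only [List.map_map]
    apply List.map_congr_left
    intro pq hpq
    simp only [Function.comp_apply, toNat_ofNat_lt (hb pq hpq)]
    exact (bin8_eq_bits8 _ (by have := hb pq hpq; omega)).symm
  have hdec : ((plaintext.toList.zip (pad_key plaintext.toList key.toList)).map
        (fun pq => pq.1.toNat ^^^ pq.2.toNat)).map
          (fun c => PySem.Int.toChars (Int.ofNat c))
      = ((plaintext.toList.zip (pad_key plaintext.toList key.toList)).map
        (fun pq => Char.ofNat (pq.1.toNat ^^^ pq.2.toNat))).map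
          (fun c => PySem.Int.toChars (Int.ofNat c.toNat)) := by
    simp only [List.map_map]
    apply List.map_congr_left
    intro pq hpq
    simp only [Function.comp_apply, toNat_ofNat_lt (hb pq hpq)]
  have hasc : ((plaintext.toList.zip (pad_key plaintext.toList key.toList)).map
        (fun pq => pq.1.toNat ^^^ pq.2.toNat)).map Char.ofNat
      = (plaintext.toList.zip (pad_key plaintext.toList key.toList)).map
        (fun pq => Char.ofNat (pq.1.toNat ^^^ pq.2.toNat)) := by
    simp [List.map_map, Function.comp_def]
  show vernam_encrypt plaintext key = vernam_encrypt_alt plaintext key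
  simp only [vernam_encrypt, vernam_encrypt_alt, to_binary, to_decimal]
  rw [chunk_eq key.toList hpre' plaintext.toList, hbin, hdec, hasc]
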